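-- pv_equiv track=rewrite | github.com/glasgow-ipl/newcwv-nossdav2022 | scripts/net_utils_SCONE21.py | count_oscillations
-- ===== SOURCE A (Python) =====
-- def count_oscillations(values): # returns the number of oscillations in the value list (cwnd)
--     changes = 0
--     if(len(values) < 2):
--         return 0
--     direction = int(values[1] > values[0]) # 1 - increasing, 0 - decreasing
--
--     for idx in range(1, len(values) - 1):
--         if direction:
--             if values[idx][1] > values[idx + 1][1]:
--                 direction = not direction
--                 changes += 1
--         else:
--             if values[idx][1] < values[idx + 1][1]:
--                 direction = not direction
--                 changes += 1
--
--     return changes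
-- ===== SOURCE B (Python) =====
-- def count_oscillations(values):
--     if len(values) < 2:
--         return 0
--     # precompute direction signs: initial sign from whole-element comparison,
--     # then one sign per strict step over the [1] fields (equal steps skipped)
--     signs = [1 if values[1] > values[0] else -1]
--     for a, b in zip(values[1:], values[2:]):
--         if b[1] > a[1]:
--             signs.append(1)
--         elif b[1] < a[1]:
--             signs.append(-1)
--     return sum(1 for x, y in zip(signs, signs[1:]) if x != y)
-- ===== Notes on version B (the rewrite author's own statement) =====
-- stated objective: alternative
-- what changed: Replaces A's single pass with an in-loop mutating direction flag by a precomputed list of step signs (initial sign from the whole-element comparison, then one sign per strict step of the [1] fields) followed by a pure count of adjacent differing signs.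
import Mathlib
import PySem

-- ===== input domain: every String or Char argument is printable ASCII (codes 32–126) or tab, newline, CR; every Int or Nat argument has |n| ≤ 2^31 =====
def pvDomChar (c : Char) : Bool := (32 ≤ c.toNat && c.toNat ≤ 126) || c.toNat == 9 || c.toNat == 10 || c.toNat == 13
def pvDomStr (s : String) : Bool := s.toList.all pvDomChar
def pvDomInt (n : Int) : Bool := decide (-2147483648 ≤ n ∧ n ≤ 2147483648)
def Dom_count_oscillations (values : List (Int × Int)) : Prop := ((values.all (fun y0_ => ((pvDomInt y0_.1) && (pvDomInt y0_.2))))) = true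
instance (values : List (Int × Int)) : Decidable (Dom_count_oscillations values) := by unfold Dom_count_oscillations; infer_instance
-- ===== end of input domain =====

-- B replaces A's in-loop mutating direction state by a precomputed list of step signs
-- plus a pure count of adjacent sign changes (objective: alternative decomposition).

-- Python tuple comparison p < q on pairs (lexicographic)
def pairLt (p q : Int × Int) : Bool := p.1 < q.1 || (p.1 == q.1 && p.2 < q.2)

-- ===== PORT A =====
def count_oscillations (values : List (Int × Int)) : Int :=
  if values.length < 2 then 0
  else
    -- direction = int(values[1] > values[0])
    let direction0 : Bool :=
      pairLt (PySem.List.pyGetD values 0 (0, 0)) (PySem.List.pyGetD values 1 (0, 0))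
    let st :=
      (PySem.List.pyRange 1 ((values.length : Int) - 1) 1).foldl
        (fun (st : Bool × Int) idx =>
          let a := (PySem.List.pyGetD values idx (0, 0)).2
          let b := (PySem.List.pyGetD values (idx + 1) (0, 0)).2
          if st.1 then
            if a > b then (!st.1, st.2 + 1) else st
          else
            if a < b then (!st.1, st.2 + 1) else st)
        (direction0, (0 : Int))
    st.2

-- ===== PORT B =====
-- step signs over the [1] fields of adjacent elements, equal steps skipped
def stepSigns : List (Int × Int) → List Int
  | a :: b :: rest =>
    if b.2 > a.2 then 1 :: stepSigns (b :: rest)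
    else if b.2 < a.2 then -1 :: stepSigns (b :: rest)
    else stepSigns (b :: rest)
  | _ => []

-- number of adjacent differing pairs in s :: rest
def countFlips : Int → List Int → Int
  | _, [] => 0
  | s, t :: rest => (if t ≠ s then 1 else 0) + countFlips t rest

def count_oscillations_alt (values : List (Int × Int)) : Int :=
  match values with
  | v0 :: v1 :: _ =>
    let s0 : Int := if pairLt v0 v1 then 1 else -1
    countFlips s0 (stepSigns values.tail)
  | _ => 0

-- ===== PRECONDITION & SPEC =====
def Spec_count_oscillations (values : List (Int × Int)) (out : Int) : Prop := out = count_oscillations_alt values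
instance (values : List (Int × Int)) (out : Int) : Decidable (Spec_count_oscillations values out) := by unfold Spec_count_oscillations; infer_instance

-- ===== CLAIM (what is proved, stated in full; the proofs are below) =====
def Claim_equal_count_oscillations : Prop := ∀ (values : List (Int × Int)), Dom_count_oscillations values → Spec_count_oscillations values (count_oscillations values)

-- ===== LEMMAS AND PROOFS =====

-- structural form of A's loop over the suffix of the list
def loopA (d : Bool) (c : Int) : List (Int × Int) → Int
  | a :: b :: rest =>
    if d then
      if a.2 > b.2 then loopA (!d) (c + 1) (b :: rest) else loopA d c (b :: rest)
    else
      if a.2 < b.2 then loopA (!d) (c + 1) (b :: rest) else loopA d c (b :: rest)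
  | _ => c

lemma loopA_eq_countFlips (vs : List (Int × Int)) (d : Bool) (c : Int) :
    loopA d c vs = c + countFlips (if d then 1 else -1) (stepSigns vs) := by
  induction vs generalizing d c with
  | nil => simp [loopA, stepSigns, countFlips]
  | cons a rest ih =>
    cases rest with
    | nil => simp [loopA, stepSigns, countFlips]
    | cons b rest' =>
      rcases lt_trichotomy a.2 b.2 with h | h | h
      · cases d <;>
          simp [loopA, stepSigns, countFlips, h, not_lt_of_gt h, ih]
        omega
      · cases d <;> simp [loopA, stepSigns, h, ih]
      · cases d <;>
          simp [loopA, stepSigns, countFlips, h, not_lt_of_gt h, ih]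
        omega

-- A's index fold over range(k+1, len-1) equals loopA on drop (k+1)
lemma fold_eq_loopA (values : List (Int × Int)) (k : Nat) (d : Bool) (c : Int) :
    ((PySem.List.pyRange ((k : Int) + 1) ((values.length : Int) - 1) 1).foldl
      (fun (st : Bool × Int) idx =>
        let a := (PySem.List.pyGetD values idx (0, 0)).2
        let b := (PySem.List.pyGetD values (idx + 1) (0, 0)).2
        if st.1 then
          if a > b then (!st.1, st.2 + 1) else st
        else
          if a < b then (!st.1, st.2 + 1) else st)
      (d, c)).2 = loopA d c (values.drop (k + 1)) := by
  by_cases hk : (k : Int) + 1 < (values.length : Int) - 1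
  · have hk2 : k + 2 < values.length := by omega
    have hcons : PySem.List.pyRange ((k : Int) + 1) ((values.length : Int) - 1) 1
        = ((k : Int) + 1) :: PySem.List.pyRange ((k : Int) + 1 + 1) ((values.length : Int) - 1) 1 :=
      PySem.List.pyRange_one_cons hk
    have h1 : k + 1 < values.length := by omega
    have g1 : PySem.List.pyGetD values ((k : Int) + 1) (0, 0) = values[k + 1] := by
      have := PySem.List.pyGetD_ofNat (xs := values) (n := k + 1) (d := ((0, 0) : Int × Int)) h1
      simpa using this
    have g2 : PySem.List.pyGetD values ((k : Int) + 1 + 1) (0, 0) = values[k + 2] := by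
      have := PySem.List.pyGetD_ofNat (xs := values) (n := k + 2) (d := ((0, 0) : Int × Int)) hk2
      push_cast at this ⊢
      convert this using 2
    have hdrop : values.drop (k + 1) = values[k + 1] :: values.drop (k + 2) := by
      rw [List.drop_eq_getElem_cons h1]
    have hdrop2 : values.drop (k + 2) = values[k + 2] :: values.drop (k + 3) := by
      rw [List.drop_eq_getElem_cons hk2]
    have ih := fold_eq_loopA values (k + 1)
    rw [hcons]
    simp only [List.foldl_cons, g1, g2]
    rw [hdrop, hdrop2]
    by_cases hd : d
    · by_cases hgt : values[k + 1].2 > values[k + 2].2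
      · simp only [hd, hgt, if_pos]
        have := ih (!true) (c + 1)
        push_cast at this ⊢
        rw [this, loopA, if_pos rfl, if_pos hgt, hdrop2]
      · simp only [hd, hgt, if_true, if_false]
        have := ih true c
        push_cast at this ⊢
        rw [this, loopA, if_pos rfl, if_neg hgt, hdrop2]
    · simp only [hd] at *
      by_cases hlt : values[k + 1].2 < values[k + 2].2
      · simp only [hlt, if_true, if_false, Bool.false_eq_true]
        have := ih (!false) (c + 1)
        push_cast at this ⊢
        rw [this, loopA, if_neg (by simp), if_pos hlt, hdrop2]
      · simp only [hlt, if_false, Bool.false_eq_true]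
        have := ih false c
        push_cast at this ⊢
        rw [this, loopA, if_neg (by simp), if_neg hlt, hdrop2]
  · have hnil : PySem.List.pyRange ((k : Int) + 1) ((values.length : Int) - 1) 1 = [] :=
      PySem.List.pyRange_one_eq_nil (by omega)
    rw [hnil]
    have : values.length ≤ k + 2 := by omega
    rcases h : values.drop (k + 1) with _ | ⟨a, rest⟩
    · simp [loopA]
    · rcases rest with _ | ⟨b, rest'⟩
      · simp [loopA]
      · exfalso
        have := List.length_drop (l := values) (i := k + 1)
        rw [h] at this
        simp at this
        omega
  termination_by values.length - k

-- ===== VERDICT (by name: the statement is the Claim_ definition above) =====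
theorem count_oscillations_spec : Claim_equal_count_oscillations := by
  intro values _
  unfold Spec_count_oscillations count_oscillations count_oscillations_alt
  match values with
  | [] => simp
  | [v] => simp
  | v0 :: v1 :: rest =>
    simp only [List.length_cons, List.tail_cons]
    have hlen : ¬ (rest.length + 1 + 1 < 2) := by omega
    rw [if_neg hlen]
    have g0 : PySem.List.pyGetD (v0 :: v1 :: rest) 0 (0, 0) = v0 := by
      simp [PySem.List.pyGetD_zero_cons]
    have g1 : PySem.List.pyGetD (v0 :: v1 :: rest) 1 (0, 0) = v1 := by
      have := PySem.List.pyGetD_ofNat (xs := v0 :: v1 :: rest) (n := 1)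
        (d := ((0, 0) : Int × Int)) (by simp)
      simpa using this
    have hf := fold_eq_loopA (v0 :: v1 :: rest) 0 (pairLt v0 v1) 0
    simp only [List.length_cons, Nat.cast_zero, zero_add, List.drop_succ_cons,
      List.drop_zero] at hf
    push_cast at hf ⊢
    simp only [g0, g1]
    rw [hf, loopA_eq_countFlips]
    simp
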